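-- pv_equiv track=rewrite | github.com/yzlu0917/apg | triver/triver/oracle/week1.py | merge_generated_trace
-- ===== SOURCE A (Python) =====
-- def merge_generated_trace(prefix_lines: list[str], generated_lines: list[str]) -> list[str]:
--     if not generated_lines:
--         return list(prefix_lines)
--     max_overlap = min(len(prefix_lines), len(generated_lines))
--     for overlap in range(max_overlap, 0, -1):
--         if prefix_lines[:overlap] == generated_lines[:overlap]:
--             return list(prefix_lines) + generated_lines[overlap:]
--     for overlap in range(max_overlap, 0, -1):
--         if prefix_lines[-overlap:] == generated_lines[:overlap]:
--             return list(prefix_lines) + generated_lines[overlap:]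
--     return list(prefix_lines) + generated_lines
-- ===== SOURCE B (Python) =====
-- def merge_generated_trace(prefix_lines: list[str], generated_lines: list[str]) -> list[str]:
--     if not generated_lines:
--         return list(prefix_lines)
--     # one-pass common-prefix length instead of descending slice comparisons
--     lcp = 0
--     for a, b in zip(prefix_lines, generated_lines):
--         if a != b:
--             break
--         lcp += 1
--     if lcp:
--         return list(prefix_lines) + generated_lines[lcp:]
--     # longest suffix of prefix_lines that is a prefix of generated_lines,
--     # found by walking the suffixes structurally (no index arithmetic)
--     t = prefix_lines
--     while t and generated_lines[:len(t)] != t: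
--         t = t[1:]
--     return list(prefix_lines) + generated_lines[len(t):]
-- ===== Notes on version B (the rewrite author's own statement) =====
-- stated objective: alternative
-- what changed: A finds the prefix overlap by descending slice-comparisons over range(m,0,-1) and the suffix-prefix overlap by a second descending range loop over negative slices; B computes the common-prefix length in one zip pass (no slicing) and finds the suffix-prefix overlap by walking the suffixes of prefix_lines structurally (t = t[1:]), with no range/index arithmetic and no separate no-match fallback.
import Mathlib
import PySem

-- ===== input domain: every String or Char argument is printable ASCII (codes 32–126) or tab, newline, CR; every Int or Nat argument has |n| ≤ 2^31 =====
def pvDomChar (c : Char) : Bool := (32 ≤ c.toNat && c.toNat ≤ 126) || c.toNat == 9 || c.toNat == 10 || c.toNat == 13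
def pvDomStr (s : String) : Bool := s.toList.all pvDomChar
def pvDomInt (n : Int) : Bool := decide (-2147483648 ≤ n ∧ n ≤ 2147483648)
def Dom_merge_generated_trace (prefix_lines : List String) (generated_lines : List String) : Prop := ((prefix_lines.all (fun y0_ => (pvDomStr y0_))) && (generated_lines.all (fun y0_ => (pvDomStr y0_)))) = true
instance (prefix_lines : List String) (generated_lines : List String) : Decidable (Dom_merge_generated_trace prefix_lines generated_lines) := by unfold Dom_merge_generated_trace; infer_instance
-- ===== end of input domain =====

-- B replaces A's two descending range(m,0,-1) slice-comparison loops by a one-pass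
-- common-prefix count and a structural walk over the suffixes of prefix_lines (alternative decomposition).

-- ===== PORT A =====
-- first loop: for overlap in range(max_overlap, 0, -1): if prefix[:overlap] == generated[:overlap]: return overlap
def pvLoopA1 (p g : List String) : List Int → Option Int
  | [] => none
  | k :: ks =>
    if PySem.List.slice p none (some k) = PySem.List.slice g none (some k) then some k
    else pvLoopA1 p g ks

-- second loop: for overlap in range(max_overlap, 0, -1): if prefix[-overlap:] == generated[:overlap]: return overlap
def pvLoopA2 (p g : List String) : List Int → Option Int
  | [] => none
  | k :: ks =>
    if PySem.List.slice p (some (-k)) none = PySem.List.slice g none (some k) then some k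
    else pvLoopA2 p g ks

def merge_generated_trace (prefix_lines : List String) (generated_lines : List String) : List String :=
  if generated_lines = [] then prefix_lines
  else
    let max_overlap : Int := min (prefix_lines.length : Int) (generated_lines.length : Int)
    match pvLoopA1 prefix_lines generated_lines (PySem.List.pyRange max_overlap 0 (-1)) with
    | some k => prefix_lines ++ PySem.List.slice generated_lines (some k) none
    | none =>
      match pvLoopA2 prefix_lines generated_lines (PySem.List.pyRange max_overlap 0 (-1)) with
      | some k => prefix_lines ++ PySem.List.slice generated_lines (some k) none
      | none => prefix_lines ++ generated_lines

-- ===== PORT B =====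
-- one-pass common-prefix length (the zip loop in Source B)
def pvLcp : List String → List String → Nat
  | a :: as, b :: bs => if a = b then pvLcp as bs + 1 else 0
  | _, _ => 0

-- longest suffix t of p with generated[:len(t)] == t (the structural while loop in Source B)
def pvSfx (g : List String) : List String → List String
  | [] => []
  | x :: rest =>
    if g.take (x :: rest).length = x :: rest then x :: rest else pvSfx g rest

def merge_generated_trace_alt (prefix_lines : List String) (generated_lines : List String) : List String :=
  if generated_lines = [] then prefix_lines
  else
    let lcp := pvLcp prefix_lines generated_lines
    if lcp ≠ 0 then prefix_lines ++ generated_lines.drop lcp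
    else prefix_lines ++ generated_lines.drop (pvSfx generated_lines prefix_lines).length

-- ===== PRECONDITION & SPEC =====
def Spec_merge_generated_trace (prefix_lines : List String) (generated_lines : List String) (out : List String) : Prop := out = merge_generated_trace_alt prefix_lines generated_lines
instance (prefix_lines : List String) (generated_lines : List String) (out : List String) : Decidable (Spec_merge_generated_trace prefix_lines generated_lines out) := by unfold Spec_merge_generated_trace; infer_instance

-- ===== CLAIM (what is proved, stated in full; the proofs are below) =====
def Claim_equal_merge_generated_trace : Prop := ∀ (prefix_lines : List String) (generated_lines : List String), Dom_merge_generated_trace prefix_lines generated_lines → Spec_merge_generated_trace prefix_lines generated_lines (merge_generated_trace prefix_lines generated_lines)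

-- ===== LEMMAS AND PROOFS =====

-- descending first-match search, Nat version
def pvFindDesc (Q : Nat → Bool) : Nat → Option Nat
  | 0 => none
  | k + 1 => if Q (k + 1) then some (k + 1) else pvFindDesc Q k

theorem pvLcp_le (p g : List String) : pvLcp p g ≤ min p.length g.length := by
  induction p generalizing g with
  | nil => simp [pvLcp]
  | cons a as ih =>
    cases g with
    | nil => simp [pvLcp]
    | cons b bs =>
      simp only [pvLcp]
      split
      · have := ih bs; simp [List.length_cons]; omega
      · omega

theorem take_eq_iff_le_lcp (p g : List String) (k : Nat) (hk : k ≤ min p.length g.length) :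
    (p.take k = g.take k ↔ k ≤ pvLcp p g) := by
  induction p generalizing g k with
  | nil => simp at hk; simp [hk, pvLcp]
  | cons a as ih =>
    cases g with
    | nil => simp at hk; simp [hk, pvLcp]
    | cons b bs =>
      cases k with
      | zero => simp
      | succ k =>
        have hk' : k ≤ min as.length bs.length := by simp at hk ⊢; omega
        simp only [List.take_succ_cons, List.cons.injEq, pvLcp]
        by_cases hab : a = b
        · rw [if_pos hab]
          constructor
          · rintro ⟨-, h2⟩
            have := (ih bs k hk').mp h2; omega
          · intro h
            exact ⟨hab, (ih bs k hk').mpr (by omega)⟩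
        · rw [if_neg hab]
          constructor
          · rintro ⟨h1, -⟩; exact absurd h1 hab
          · omega

theorem pvFindDesc_congr (Q R : Nat → Bool) (m : Nat)
    (h : ∀ k, 1 ≤ k → k ≤ m → Q k = R k) : pvFindDesc Q m = pvFindDesc R m := by
  induction m with
  | zero => rfl
  | succ m ih =>
    simp only [pvFindDesc, h (m + 1) (by omega) (by omega)]
    rw [ih (fun k h1 h2 => h k h1 (by omega))]

theorem pvFindDesc_high_false (Q : Nat → Bool) (m n : Nat) (hmn : m ≤ n)
    (h : ∀ k, m < k → k ≤ n → Q k = false) : pvFindDesc Q n = pvFindDesc Q m := by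
  induction n with
  | zero =>
    have : m = 0 := by omega
    rw [this]
  | succ n ih =>
    rcases Nat.eq_or_lt_of_le hmn with h1 | h1
    · rw [h1]
    · simp only [pvFindDesc, h (n + 1) (by omega) (by omega)]
      exact ih (by omega) (fun k hk1 hk2 => h k hk1 (by omega))

-- pvLoopA1 over the countdown range is: some lcp if lcp ≥ 1, none otherwise
theorem loopA1_eq (p g : List String) (m : Nat)
    (hm : m ≤ min p.length g.length) (hlcp : pvLcp p g ≤ m) :
    pvLoopA1 p g (PySem.List.pyRange (m : Int) 0 (-1)) =
      if pvLcp p g = 0 then none else some (pvLcp p g : Int) := by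
  induction m with
  | zero =>
    rw [PySem.List.pyRange_neg_one_eq_nil (by omega)]
    have h0 : pvLcp p g = 0 := by omega
    simp [pvLoopA1, h0]
  | succ m ih =>
    rw [PySem.List.pyRange_neg_one_cons (by exact_mod_cast Nat.succ_pos m)]
    simp only [pvLoopA1]
    rw [PySem.List.slice_to_natCast, PySem.List.slice_to_natCast]
    have hiff := take_eq_iff_le_lcp p g (m + 1) hm
    by_cases hc : p.take (m + 1) = g.take (m + 1)
    · have h1 := hiff.mp hc
      have hEq : pvLcp p g = m + 1 := by omega
      simp [hc, hEq]
    · have hlt : pvLcp p g ≤ m := by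
        rcases Nat.lt_or_ge (pvLcp p g) (m + 1) with h | h
        · omega
        · exact absurd (hiff.mpr (by omega)) hc
      simp only [hc, if_false]
      rw [show ((m + 1 : Nat) : Int) - 1 = (m : Int) by push_cast; ring]
      exact ih (by omega) hlt

-- the condition both the second loop of A and pvSfx test, as a Nat predicate
def pvQ (p g : List String) (k : Nat) : Bool := decide (p.drop (p.length - k) = g.take k)

theorem loopA2_eq (p g : List String) (m : Nat) (hmp : m ≤ p.length) :
    pvLoopA2 p g (PySem.List.pyRange (m : Int) 0 (-1)) =
      (pvFindDesc (pvQ p g) m).map (fun k => (k : Int)) := by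
  induction m with
  | zero =>
    rw [PySem.List.pyRange_neg_one_eq_nil (by omega)]
    simp [pvLoopA2, pvFindDesc]
  | succ m ih =>
    rw [PySem.List.pyRange_neg_one_cons (by exact_mod_cast Nat.succ_pos m)]
    simp only [pvLoopA2, pvFindDesc]
    rw [show (-(( (m+1 : Nat) : Int))) = -(((m+1 : Nat) : Int)) from rfl]
    rw [PySem.List.slice_from_neg_natCast p (m + 1) (by omega),
        PySem.List.slice_to_natCast]
    by_cases hc : p.drop (p.length - (m + 1)) = g.take (m + 1)
    · simp [pvQ, hc]
    · simp only [pvQ, hc, decide_false, if_false, Bool.false_eq_true]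
      rw [show ((m + 1 : Nat) : Int) - 1 = ((m : Nat) : Int) by push_cast; ring]
      exact ih (by omega)

-- pvSfx computes the same descending search, over the full length of p
theorem pvSfx_length (g p : List String) :
    (pvSfx g p).length = (pvFindDesc (fun k => decide (g.take k = p.drop (p.length - k))) p.length).getD 0 := by
  induction p with
  | nil => simp [pvSfx, pvFindDesc]
  | cons x rest ih =>
    simp only [pvSfx, List.length_cons, pvFindDesc]
    by_cases hc : g.take (rest.length + 1) = x :: rest
    · have : (x :: rest).drop ((x :: rest).length - (rest.length + 1)) = x :: rest := by
        simp
      simp only [List.length_cons] at this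
      simp [hc]
    · have hdrop : (x :: rest).drop (rest.length + 1 - (rest.length + 1)) = x :: rest := by simp
      simp only [hdrop, hc, decide_false, Bool.false_eq_true, if_false] at *
      rw [ih]
      congr 1
      apply pvFindDesc_congr
      intro k h1 h2
      congr 1
      have : rest.length + 1 - k = (rest.length - k) + 1 := by omega
      simp [this]

-- pvQ is false above min(|p|,|g|) (length mismatch), so the search range can shrink to m
theorem pvQ_false_high (p g : List String) (k : Nat) (hk : k ≤ p.length)
    (hg : g.length < k) : pvQ p g k = false := by
  simp only [pvQ, decide_eq_false_iff_not]
  intro h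
  have h1 : (p.drop (p.length - k)).length = k := by simp; omega
  have h2 : (g.take k).length = g.length := by simp; omega
  rw [h] at h1
  omega

theorem merge_generated_trace_eq (p g : List String) :
    merge_generated_trace p g = merge_generated_trace_alt p g := by
  by_cases hg : g = []
  · simp [merge_generated_trace, merge_generated_trace_alt, hg]
  · have hm : (min (p.length : Int) (g.length : Int)) = ((min p.length g.length : Nat) : Int) := by
      push_cast; rfl
    set m := min p.length g.length with hmdef
    have hlcp_le := pvLcp_le p g
    by_cases hz : pvLcp p g = 0
    · -- no prefix overlap: both sides run the suffix search
      have hA1 : pvLoopA1 p g (PySem.List.pyRange ((m : Nat) : Int) 0 (-1)) = none := by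
        rw [loopA1_eq p g m le_rfl (by omega)]; simp [hz]
      have hQeq : pvFindDesc (fun k => decide (g.take k = p.drop (p.length - k))) p.length
          = pvFindDesc (pvQ p g) p.length := by
        apply pvFindDesc_congr
        intro k _ _
        simp [pvQ, eq_comm]
      have hshrink : pvFindDesc (pvQ p g) p.length = pvFindDesc (pvQ p g) m := by
        apply pvFindDesc_high_false _ _ _ (by omega)
        intro k hk1 hk2
        exact pvQ_false_high p g k hk2 (by omega)
      have hsfx : (pvSfx g p).length = (pvFindDesc (pvQ p g) m).getD 0 := by
        rw [pvSfx_length, hQeq, hshrink]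
      cases hfd : pvFindDesc (pvQ p g) m with
      | none =>
        have hA2 : pvLoopA2 p g (PySem.List.pyRange ((m : Nat) : Int) 0 (-1)) = none := by
          rw [loopA2_eq p g m (by omega), hfd]; rfl
        simp [merge_generated_trace, merge_generated_trace_alt, hg, hm, hA1, hA2, hz, hsfx, hfd]
      | some k =>
        have hA2 : pvLoopA2 p g (PySem.List.pyRange ((m : Nat) : Int) 0 (-1)) = some ((k : Nat) : Int) := by
          rw [loopA2_eq p g m (by omega), hfd]; rfl
        have hslice : PySem.List.slice g (some ((k : Nat) : Int)) none = g.drop k := by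
          simp [PySem.List.slice_from_natCast]
        simp [merge_generated_trace, merge_generated_trace_alt, hg, hm, hA1, hA2, hz, hsfx, hfd, hslice]
    · -- prefix overlap present
      have hA1 : pvLoopA1 p g (PySem.List.pyRange ((m : Nat) : Int) 0 (-1)) =
          some ((pvLcp p g : Nat) : Int) := by
        rw [loopA1_eq p g m le_rfl (by omega)]; simp [hz]
      have hslice : PySem.List.slice g (some ((pvLcp p g : Nat) : Int)) none = g.drop (pvLcp p g) := by
        simp [PySem.List.slice_from_natCast]
      simp [merge_generated_trace, merge_generated_trace_alt, hg, hm, hA1, hz, hslice]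

-- ===== VERDICT (by name: the statement is the Claim_ definition above) =====
theorem merge_generated_trace_spec : Claim_equal_merge_generated_trace := by
  intro p g _
  unfold Spec_merge_generated_trace
  exact merge_generated_trace_eq p g
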